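-- pv_equiv track=rewrite | github.com/MdAbedin/binarysearch | 0799 Remove Duplicates Occurring More Than Twice.py | solve
-- ===== SOURCE A (Python) =====
-- def solve(nums):
--     boundary = -1
--     skips = 0
--
--     for i in range(len(nums)):
--         if boundary >= 1 and nums[boundary-1] == nums[boundary] == nums[i]:
--             skips += 1
--         else:
--             boundary += 1
--             nums[boundary], nums[i] = nums[i], nums[boundary]
--
--     for _ in range(skips): nums.pop()
--
--     return nums
-- ===== SOURCE B (Python) =====
-- def solve(nums):
--     kept = []
--     prev = 0
--     cnt = 0
--     for x in nums:
--         if kept and x == prev: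
--             cnt += 1
--         else:
--             prev = x
--             cnt = 1
--         if cnt <= 2:
--             kept.append(x)
--     nums[:] = kept
--     return nums
-- ===== Notes on version B (the rewrite author's own statement) =====
-- stated objective: simpler
-- what changed: Replaces A's boundary/swap two-pointer in-place compaction plus trailing pops with a single count-driven rebuild over consecutive runs (prev,count state) followed by nums[:] = kept.
import Mathlib
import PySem

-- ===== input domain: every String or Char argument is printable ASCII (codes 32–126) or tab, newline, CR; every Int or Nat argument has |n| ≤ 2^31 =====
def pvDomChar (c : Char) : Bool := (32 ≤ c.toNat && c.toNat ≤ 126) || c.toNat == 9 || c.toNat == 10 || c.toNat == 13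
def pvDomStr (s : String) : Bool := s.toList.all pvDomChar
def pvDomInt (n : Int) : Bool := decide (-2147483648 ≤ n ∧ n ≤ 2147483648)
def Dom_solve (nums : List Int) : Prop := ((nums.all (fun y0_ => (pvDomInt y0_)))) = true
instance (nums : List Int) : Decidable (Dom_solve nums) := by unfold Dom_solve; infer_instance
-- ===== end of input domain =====

-- B replaces A's boundary/swap two-pointer compaction (+ trailing pops) with a count-driven
-- rebuild over consecutive runs; equal return values (both also leave nums holding that value).

-- ===== PORT A =====
-- loop body of A: state (nums, boundary, skips); all indices A uses are in range, so
-- pyGetD equals Python's nums[...] here, and pop() on the nonempty list is dropLast.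
def stepA (st : List Int × Int × Int) (i : Int) : List Int × Int × Int :=
  let l := st.1; let b := st.2.1; let s := st.2.2
  if b ≥ 1 ∧ PySem.List.pyGetD l (b-1) 0 = PySem.List.pyGetD l b 0
           ∧ PySem.List.pyGetD l b 0 = PySem.List.pyGetD l i 0 then
    (l, b, s + 1)
  else
    let b' := b + 1
    let vi := PySem.List.pyGetD l i 0
    let vb := PySem.List.pyGetD l b' 0
    ((l.set b'.toNat vi).set i.toNat vb, b', s)

def solve (nums : List Int) : List Int :=
  let st := (PySem.List.pyRange 0 nums.length 1).foldl stepA (nums, -1, 0)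
  (PySem.List.pyRange 0 st.2.2 1).foldl (fun l _ => l.dropLast) st.1

-- ===== PORT B =====
-- loop body of B: state (kept, prev, cnt)
def stepB (st : List Int × Int × Nat) (x : Int) : List Int × Int × Nat :=
  let kept := st.1; let prev := st.2.1; let cnt := st.2.2
  let pc := if kept ≠ [] ∧ x = prev then (prev, cnt + 1) else (x, 1)
  if pc.2 ≤ 2 then (kept ++ [x], pc.1, pc.2) else (kept, pc.1, pc.2)

def solve_alt (nums : List Int) : List Int :=
  (nums.foldl stepB ([], 0, 0)).1

-- ===== PRECONDITION & SPEC =====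
def Spec_solve (nums : List Int) (out : List Int) : Prop := out = solve_alt nums
instance (nums : List Int) (out : List Int) : Decidable (Spec_solve nums out) := by unfold Spec_solve; infer_instance

-- ===== CLAIM (what is proved, stated in full; the proofs are below) =====
def Claim_equal_solve : Prop := ∀ (nums : List Int), Dom_solve nums → Spec_solve nums (solve nums)

-- ===== LEMMAS AND PROOFS =====

-- invariant relating B's (kept, prev, cnt) state: kept ends in one copy of prev (cnt = 1)
-- or two copies (cnt ≥ 2), preceded by an element ≠ prev
def KInv (kept : List Int) (prev : Int) (cnt : Nat) : Prop :=
  (kept = [] ∧ cnt = 0) ∨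
  ((cnt = 1 ∧ ∃ ks, kept = ks ++ [prev] ∧ ∀ h : ks ≠ [], ks.getLast h ≠ prev) ∨
   (2 ≤ cnt ∧ ∃ ks, kept = ks ++ [prev, prev] ∧ ∀ h : ks ≠ [], ks.getLast h ≠ prev))

-- getLast of the kept list is always prev
theorem kinv_getLast (kept : List Int) (prev : Int) (cnt : Nat)
    (h : KInv kept prev cnt) (hne : kept ≠ []) : kept.getLast hne = prev := by
  have hsome : kept.getLast? = some prev := by
    rcases h with ⟨h1, _⟩ | ⟨⟨_, ks, hk, _⟩ | ⟨_, ks, hk, _⟩⟩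
    · exact absurd h1 hne
    · rw [hk, List.getLast?_concat]
    · rw [hk, show ks ++ [prev, prev] = (ks ++ [prev]) ++ [prev] by simp, List.getLast?_concat]
  rw [List.getLast?_eq_some_getLast hne] at hsome
  exact Option.some_injective _ hsome

theorem stepB_skip (kept : List Int) (prev : Int) (cnt : Nat) (x : Int)
    (hne : kept ≠ []) (hx : x = prev) (hc : 2 ≤ cnt) :
    stepB (kept, prev, cnt) x = (kept, prev, cnt + 1) := by
  subst hx
  simp [stepB, hne]
  omega

theorem stepB_run2 (kept : List Int) (prev : Int) (cnt : Nat) (x : Int)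
    (hne : kept ≠ []) (hx : x = prev) (hc : cnt = 1) :
    stepB (kept, prev, cnt) x = (kept ++ [x], prev, 2) := by
  subst hx; subst hc
  simp [stepB, hne]

theorem stepB_new (kept : List Int) (prev : Int) (cnt : Nat) (x : Int)
    (hcond : ¬ (kept ≠ [] ∧ x = prev)) :
    stepB (kept, prev, cnt) x = (kept ++ [x], x, 1) := by
  simp [stepB, hcond]

theorem inv_stepB (kept : List Int) (prev : Int) (cnt : Nat) (x : Int)
    (h : KInv kept prev cnt) : KInv (stepB (kept, prev, cnt) x).1 (stepB (kept, prev, cnt) x).2.1 (stepB (kept, prev, cnt) x).2.2 := by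
  by_cases hc : kept ≠ [] ∧ x = prev
  · rcases h with ⟨h1, _⟩ | ⟨⟨hc1, ks, hk, hl⟩ | ⟨hcnt, ks, hk, hl⟩⟩
    · exact absurd h1 hc.1
    · rw [stepB_run2 kept prev cnt x hc.1 hc.2 hc1]
      show KInv (kept ++ [x]) prev 2
      right; right
      exact ⟨by omega, ks, by simp [hk, hc.2], hl⟩
    · rw [stepB_skip kept prev cnt x hc.1 hc.2 hcnt]
      show KInv kept prev (cnt + 1)
      right; right
      exact ⟨by omega, ks, hk, hl⟩
  · rw [stepB_new kept prev cnt x hc]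
    show KInv (kept ++ [x]) x 1
    right; left
    refine ⟨rfl, kept, rfl, fun hne => ?_⟩
    have hpx : x ≠ prev := fun e => hc ⟨hne, e⟩
    rw [kinv_getLast kept prev cnt h hne]
    exact fun e => hpx e.symm

-- element at the seam of an append, as Python indexing
theorem getD_mid (p q : List Int) (x : Int) :
    PySem.List.pyGetD (p ++ x :: q) ((p.length : Int)) 0 = x := by
  rw [PySem.List.pyGetD_natCast]
  simp [List.getD_eq_getElem?_getD]

theorem set_mid (p q : List Int) (x v : Int) : (p ++ x :: q).set p.length v = p ++ v :: q := by
  induction p with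
  | nil => simp
  | cons a p ih => simp [ih]

-- the main loop correspondence: A's fold over the remaining indices, started from a list
-- whose kept-prefix matches B's state, lands on B's final kept-prefix (junk permuted behind)
theorem loopAB (rest : List Int) : ∀ (kept junk : List Int) (prev : Int) (cnt : Nat),
    KInv kept prev cnt →
    ∃ junk2 : List Int,
      (PySem.List.pyRange (kept.length + junk.length) (kept.length + junk.length + rest.length) 1).foldl
          stepA (kept ++ junk ++ rest, (kept.length : Int) - 1, (junk.length : Int))
        = ((rest.foldl stepB (kept, prev, cnt)).1 ++ junk2,
           ((rest.foldl stepB (kept, prev, cnt)).1.length : Int) - 1, (junk2.length : Int)) := by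
  induction rest with
  | nil =>
    intro kept junk prev cnt _
    refine ⟨junk, ?_⟩
    rw [PySem.List.pyRange_one_eq_nil (by simp)]
    simp
  | cons x rest' ih =>
    intro kept junk prev cnt h
    have hxval : PySem.List.pyGetD (kept ++ junk ++ (x :: rest')) ((kept.length : Int) + (junk.length : Int)) 0 = x := by
      have := getD_mid (kept ++ junk) rest' x
      rw [List.append_assoc] at this
      simpa using this
    rw [PySem.List.pyRange_one_cons (by push_cast [List.length_append, List.length_cons, List.length_nil]; omega), List.foldl_cons]
    by_cases hskip : kept ≠ [] ∧ x = prev ∧ 2 ≤ cnt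
    · -- A skips, B skips
      obtain ⟨hne, hxp, hcnt⟩ := hskip
      rcases h with ⟨h1, _⟩ | ⟨⟨hc1, _⟩ | ⟨_, ks, hk, _⟩⟩
      · exact absurd h1 hne
      · omega
      · have hA : stepA (kept ++ junk ++ (x :: rest'), (kept.length : Int) - 1, (junk.length : Int)) ((kept.length : Int) + (junk.length : Int))
            = (kept ++ junk ++ (x :: rest'), (kept.length : Int) - 1, (junk.length : Int) + 1) := by
          unfold stepA
          rw [if_pos]
          constructor
          · rw [hk]; push_cast [List.length_append, List.length_cons, List.length_nil]; omega
          have e1 : PySem.List.pyGetD (kept ++ junk ++ (x :: rest')) ((kept.length : Int) - 1) 0 = prev := by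
            rw [hk, show (ks ++ [prev, prev]) ++ junk ++ (x :: rest') = (ks ++ [prev]) ++ prev :: (junk ++ x :: rest') by simp,
                show ((ks ++ [prev, prev]).length : Int) - 1 = (((ks ++ [prev]).length : Nat) : Int) by push_cast [List.length_append, List.length_cons, List.length_nil]; omega]
            exact getD_mid _ _ _
          have e2 : PySem.List.pyGetD (kept ++ junk ++ (x :: rest')) ((kept.length : Int) - 1 - 1) 0 = prev := by
            rw [hk, show (ks ++ [prev, prev]) ++ junk ++ (x :: rest') = ks ++ prev :: (prev :: (junk ++ x :: rest')) by simp,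
                show ((ks ++ [prev, prev]).length : Int) - 1 - 1 = ((ks.length : Nat) : Int) by push_cast [List.length_append, List.length_cons, List.length_nil]; omega]
            exact getD_mid _ _ _
          exact ⟨by rw [e1, e2], by rw [e1, hxval, hxp]⟩
        rw [hA]
        have hB : stepB (kept, prev, cnt) x = (kept, prev, cnt + 1) :=
          stepB_skip kept prev cnt x hne hxp hcnt
        have h' : KInv kept prev (cnt + 1) := by
          have := inv_stepB kept prev cnt x (Or.inr (Or.inr ⟨hcnt, ks, hk, by assumption⟩))
          rwa [hB] at this
        obtain ⟨j2, hj2⟩ := ih kept (junk ++ [x]) prev (cnt + 1) h'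
        refine ⟨j2, ?_⟩
        rw [List.foldl_cons, hB]
        have harr : kept ++ junk ++ (x :: rest') = kept ++ (junk ++ [x]) ++ rest' := by simp
        rw [show ((kept.length : Int) + (junk.length : Int) + 1) = ((kept.length : Int) + (((junk ++ [x]).length : Nat) : Int)) by push_cast [List.length_append, List.length_cons, List.length_nil]; omega,
            show ((kept.length : Int) + (junk.length : Int) + ((x :: rest').length : Int)) = ((kept.length : Int) + (((junk ++ [x]).length : Nat) : Int) + (rest'.length : Int)) by push_cast [List.length_append, List.length_cons, List.length_nil]; omega,
            show ((junk.length : Int) + 1) = (((junk ++ [x]).length : Nat) : Int) by push_cast [List.length_append, List.length_cons, List.length_nil]; omega,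
            harr]
        exact hj2
    · -- A keeps, B keeps
      have hstep : ∃ p c, stepB (kept, prev, cnt) x = (kept ++ [x], p, c) := by
        by_cases hc : kept ≠ [] ∧ x = prev
        · rcases h with ⟨h1, _⟩ | ⟨⟨hc1, _⟩ | ⟨hcnt, _⟩⟩
          · exact absurd h1 hc.1
          · exact ⟨prev, 2, stepB_run2 kept prev cnt x hc.1 hc.2 hc1⟩
          · exact absurd ⟨hc.1, hc.2, hcnt⟩ hskip
        · exact ⟨x, 1, stepB_new kept prev cnt x hc⟩
      obtain ⟨p2, c2, hB⟩ := hstep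
      have hnotC : ¬ ((kept.length : Int) - 1 ≥ 1 ∧
          PySem.List.pyGetD (kept ++ junk ++ (x :: rest')) ((kept.length : Int) - 1 - 1) 0 = PySem.List.pyGetD (kept ++ junk ++ (x :: rest')) ((kept.length : Int) - 1) 0 ∧
          PySem.List.pyGetD (kept ++ junk ++ (x :: rest')) ((kept.length : Int) - 1) 0 = PySem.List.pyGetD (kept ++ junk ++ (x :: rest')) ((kept.length : Int) + (junk.length : Int)) 0) := by
        rintro ⟨hb1, hEq1, hEq2⟩
        rcases h with ⟨h1, _⟩ | ⟨⟨hc1, ks, hk, hl⟩ | ⟨hcnt, ks, hk, hl⟩⟩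
        · subst h1; simp at hb1
        · -- cnt = 1 : kept ends in ...a, prev with a ≠ prev
          have hks : ks ≠ [] := by
            rintro rfl
            rw [hk] at hb1; simp at hb1
          obtain ⟨ks', a, hks2⟩ := (List.eq_nil_or_concat ks).resolve_left hks
          rw [List.concat_eq_append] at hks2
          subst hks2
          have e1 : PySem.List.pyGetD (kept ++ junk ++ (x :: rest')) ((kept.length : Int) - 1) 0 = prev := by
            rw [hk, show (ks' ++ [a] ++ [prev]) ++ junk ++ (x :: rest') = (ks' ++ [a]) ++ prev :: (junk ++ x :: rest') by simp,
                show (((ks' ++ [a] ++ [prev]).length : Nat) : Int) - 1 = (((ks' ++ [a]).length : Nat) : Int) by push_cast [List.length_append, List.length_cons, List.length_nil]; omega]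
            exact getD_mid _ _ _
          have e2 : PySem.List.pyGetD (kept ++ junk ++ (x :: rest')) ((kept.length : Int) - 1 - 1) 0 = a := by
            rw [hk, show (ks' ++ [a] ++ [prev]) ++ junk ++ (x :: rest') = ks' ++ a :: (prev :: (junk ++ x :: rest')) by simp,
                show (((ks' ++ [a] ++ [prev]).length : Nat) : Int) - 1 - 1 = ((ks'.length : Nat) : Int) by push_cast [List.length_append, List.length_cons, List.length_nil]; omega]
            exact getD_mid _ _ _
          have ha : a ≠ prev := by
            have := hl hks
            rwa [List.getLast_concat] at this
          rw [e1, e2] at hEq1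
          exact ha hEq1
        · -- cnt ≥ 2 : last two are prev, so x = prev would make B skip
          have e1 : PySem.List.pyGetD (kept ++ junk ++ (x :: rest')) ((kept.length : Int) - 1) 0 = prev := by
            rw [hk, show (ks ++ [prev, prev]) ++ junk ++ (x :: rest') = (ks ++ [prev]) ++ prev :: (junk ++ x :: rest') by simp,
                show (((ks ++ [prev, prev]).length : Nat) : Int) - 1 = (((ks ++ [prev]).length : Nat) : Int) by push_cast [List.length_append, List.length_cons, List.length_nil]; omega]
            exact getD_mid _ _ _
          rw [e1, hxval] at hEq2
          refine hskip ⟨by rw [hk]; simp, hEq2.symm, hcnt⟩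
      have h' : KInv (kept ++ [x]) p2 c2 := by
        have := inv_stepB kept prev cnt x h
        rwa [hB] at this
      -- evaluate A's else branch
      rcases junk with _ | ⟨jh, jt⟩
      · -- junk empty : the swap is the identity
        simp only [List.append_nil, List.length_nil, Nat.cast_zero, add_zero] at hxval hnotC ⊢
        have hA : stepA (kept ++ x :: rest', (kept.length : Int) - 1, (0 : Int)) ((kept.length : Int))
            = ((kept ++ [x]) ++ rest', (((kept ++ [x]).length : Nat) : Int) - 1, (0 : Int)) := by
          unfold stepA
          rw [if_neg hnotC]
          simp only [Prod.mk.injEq]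
          refine ⟨?_, by push_cast [List.length_append, List.length_cons, List.length_nil]; omega, trivial⟩
          have hget : PySem.List.pyGetD (kept ++ x :: rest') ((kept.length : Int) - 1 + 1) 0 = x := by
            rw [show (kept.length : Int) - 1 + 1 = ((kept.length : Nat) : Int) by ring]
            exact getD_mid kept rest' x
          rw [hget, hxval]
          rw [show ((kept.length : Int) - 1 + 1).toNat = kept.length by omega,
              show ((kept.length : Int)).toNat = kept.length by omega]
          rw [set_mid, set_mid]
          simp
        rw [hA]
        obtain ⟨j2, hj2⟩ := ih (kept ++ [x]) [] p2 c2 h'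
        simp only [List.append_nil, List.length_nil, Nat.cast_zero, add_zero] at hj2
        refine ⟨j2, ?_⟩
        rw [List.foldl_cons, hB]
        rw [show (kept.length : Int) + ((x :: rest').length : Int) = (((kept ++ [x]).length : Nat) : Int) + ((rest'.length : Nat) : Int) by push_cast [List.length_append, List.length_cons, List.length_nil]; omega,
            show (kept.length : Int) + 1 = (((kept ++ [x]).length : Nat) : Int) by push_cast [List.length_append, List.length_cons, List.length_nil]; omega]
        exact hj2
      · -- junk nonempty : the head of the junk is swapped to the back
        have hA : stepA (kept ++ (jh :: jt) ++ x :: rest', (kept.length : Int) - 1, (((jh :: jt).length : Nat) : Int)) ((kept.length : Int) + (((jh :: jt).length : Nat) : Int))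
            = ((kept ++ [x]) ++ (jt ++ [jh]) ++ rest', (((kept ++ [x]).length : Nat) : Int) - 1, (((jh :: jt).length : Nat) : Int)) := by
          unfold stepA
          rw [if_neg hnotC]
          simp only [Prod.mk.injEq]
          refine ⟨?_, by push_cast [List.length_append, List.length_cons, List.length_nil]; omega, trivial⟩
          have hget : PySem.List.pyGetD (kept ++ (jh :: jt) ++ x :: rest') ((kept.length : Int) - 1 + 1) 0 = jh := by
            rw [show (kept.length : Int) - 1 + 1 = ((kept.length : Nat) : Int) by ring,
                show kept ++ (jh :: jt) ++ x :: rest' = kept ++ jh :: (jt ++ x :: rest') by simp]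
            exact getD_mid kept (jt ++ x :: rest') jh
          rw [hget, hxval]
          rw [show ((kept.length : Int) - 1 + 1).toNat = kept.length by omega]
          rw [show kept ++ (jh :: jt) ++ x :: rest' = kept ++ jh :: (jt ++ x :: rest') by simp, set_mid]
          rw [show ((kept.length : Int) + (((jh :: jt).length : Nat) : Int)).toNat = (kept ++ x :: jt).length by simp [List.length_append, List.length_cons]; omega]
          rw [show kept ++ x :: (jt ++ x :: rest') = (kept ++ x :: jt) ++ x :: rest' by simp, set_mid]
          simp
        rw [hA]
        obtain ⟨j2, hj2⟩ := ih (kept ++ [x]) (jt ++ [jh]) p2 c2 h'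
        refine ⟨j2, ?_⟩
        rw [List.foldl_cons, hB]
        rw [show (kept.length : Int) + (((jh :: jt).length : Nat) : Int) + ((x :: rest').length : Int) = (((kept ++ [x]).length : Nat) : Int) + (((jt ++ [jh]).length : Nat) : Int) + ((rest'.length : Nat) : Int) by push_cast [List.length_append, List.length_cons, List.length_nil]; omega,
            show (kept.length : Int) + (((jh :: jt).length : Nat) : Int) + 1 = (((kept ++ [x]).length : Nat) : Int) + (((jt ++ [jh]).length : Nat) : Int) by push_cast [List.length_append, List.length_cons, List.length_nil]; omega,
            show (((jh :: jt).length : Nat) : Int) = (((jt ++ [jh]).length : Nat) : Int) by push_cast [List.length_append, List.length_cons, List.length_nil]; omega]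
        exact hj2

theorem iter_dropLast (s : Nat) : ∀ l : List Int,
    (PySem.List.pyRange 0 (s : Int) 1).foldl (fun l _ => l.dropLast) l = l.take (l.length - s) := by
  induction s with
  | zero => intro l; simp
  | succ m ihm =>
    intro l
    rw [show ((m + 1 : Nat) : Int) = ((m : Nat) : Int) + 1 by push_cast; ring,
        PySem.List.pyRange_one_succ_right (by positivity), List.foldl_append]
    simp only [List.foldl_cons, List.foldl_nil]
    rw [ihm l, List.dropLast_eq_take, List.take_take, List.length_take]
    congr 1
    omega

theorem pops_eq (k : List Int) : ∀ j : List Int,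
    (PySem.List.pyRange 0 (j.length : Int) 1).foldl (fun l _ => l.dropLast) (k ++ j) = k := by
  intro j
  rw [iter_dropLast j.length (k ++ j)]
  rw [show (k ++ j).length - j.length = k.length by simp]
  exact List.take_left

-- ===== VERDICT (by name: the statement is the Claim_ definition above) =====
theorem solve_spec : Claim_equal_solve := by
  intro nums _
  unfold Spec_solve solve solve_alt
  obtain ⟨j2, hfold⟩ := loopAB nums [] [] 0 0 (Or.inl ⟨rfl, rfl⟩)
  simp only [List.nil_append, List.length_nil, Nat.cast_zero, zero_add, zero_sub] at hfold
  show (PySem.List.pyRange 0 ((List.foldl stepA (nums, -1, 0) (PySem.List.pyRange 0 nums.length 1)).2.2) 1).foldl (fun l _ => l.dropLast) (List.foldl stepA (nums, -1, 0) (PySem.List.pyRange 0 nums.length 1)).1 = _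
  rw [hfold]
  exact pops_eq _ j2
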